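-- pv_equiv track=rewrite | github.com/oib/AITBC | apps/coordinator-api/src/app/services/multi_region_manager.py | _regions_in_same_area
-- ===== SOURCE A (Python) =====
-- def _regions_in_same_area(region1: str, region2: str) -> bool:
--     """Check if two regions are in the same geographic area"""
--
--     # Simplified geographic area mapping
--     area_mapping = {
--         "US": ["US", "CA"],
--         "EU": ["GB", "DE", "FR", "IT", "ES", "NL", "BE", "AT", "CH", "SE", "NO", "DK", "FI"],
--         "APAC": ["JP", "KR", "SG", "AU", "IN", "TH", "MY", "ID", "PH", "VN"],
--         "LATAM": ["BR", "MX", "AR", "CL", "CO", "PE", "VE"],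
--     }
--
--     for _area, regions in area_mapping.items():
--         if region1 in regions and region2 in regions:
--             return True
--
--     return False
-- ===== SOURCE B (Python) =====
-- _COUNTRY_TO_AREA = {
--     country: area
--     for area, countries in {
--         "US": ["US", "CA"],
--         "EU": ["GB", "DE", "FR", "IT", "ES", "NL", "BE", "AT", "CH", "SE", "NO", "DK", "FI"],
--         "APAC": ["JP", "KR", "SG", "AU", "IN", "TH", "MY", "ID", "PH", "VN"],
--         "LATAM": ["BR", "MX", "AR", "CL", "CO", "PE", "VE"],
--     }.items()
--     for country in countries
-- }
--
--
-- def _regions_in_same_area(region1: str, region2: str) -> bool: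
--     """Check if two regions are in the same geographic area"""
--     area1 = _COUNTRY_TO_AREA.get(region1)
--     return area1 is not None and area1 == _COUNTRY_TO_AREA.get(region2)
-- ===== Notes on version B (the rewrite author's own statement) =====
-- stated objective: simpler
-- what changed: Replaced the per-area loop with membership scans by a reverse country-to-area index built once from the same constant data; the function becomes two dict lookups and an equality test guarded against the both-unknown case.
import Mathlib
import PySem

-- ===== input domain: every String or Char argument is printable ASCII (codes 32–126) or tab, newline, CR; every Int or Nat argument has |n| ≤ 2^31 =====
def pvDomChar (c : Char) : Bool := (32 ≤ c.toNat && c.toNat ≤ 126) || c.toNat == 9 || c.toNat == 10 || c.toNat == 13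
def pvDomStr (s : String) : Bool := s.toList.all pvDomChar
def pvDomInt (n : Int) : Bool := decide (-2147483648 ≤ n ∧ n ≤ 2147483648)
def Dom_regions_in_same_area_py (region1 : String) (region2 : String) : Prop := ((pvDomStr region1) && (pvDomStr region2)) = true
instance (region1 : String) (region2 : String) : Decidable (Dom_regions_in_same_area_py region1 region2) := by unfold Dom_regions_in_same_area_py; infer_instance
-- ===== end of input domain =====

-- B replaces A's per-area membership scan by a reverse country→area index built once
-- from the same constant data, looked up twice and compared (objective: simpler).


-- ===== PORT A =====
-- area_mapping, in the dict's insertion order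
def pvAreaMapping : List (String × List String) :=
  [("US", ["US", "CA"]),
   ("EU", ["GB", "DE", "FR", "IT", "ES", "NL", "BE", "AT", "CH", "SE", "NO", "DK", "FI"]),
   ("APAC", ["JP", "KR", "SG", "AU", "IN", "TH", "MY", "ID", "PH", "VN"]),
   ("LATAM", ["BR", "MX", "AR", "CL", "CO", "PE", "VE"])]

-- the for-loop with its early return
def pvLoopA : List (String × List String) → String → String → Bool
  | [], _, _ => false
  | (_area, regions) :: rest, r1, r2 =>
    if regions.contains r1 && regions.contains r2 then true
    else pvLoopA rest r1 r2

def regions_in_same_area_py (region1 : String) (region2 : String) : Bool :=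
  pvLoopA pvAreaMapping region1 region2

-- ===== PORT B =====
-- _COUNTRY_TO_AREA: the dict comprehension {country: area for area, countries in …
-- for country in countries} (keys are distinct, so ofList of the flattened pairs)
def pvCountryToArea : PySem.Dict String String :=
  PySem.Dict.ofList (pvAreaMapping.flatMap fun p => p.2.map fun c => (c, p.1))

def regions_in_same_area_py_alt (region1 : String) (region2 : String) : Bool :=
  match pvCountryToArea.get? region1 with
  | none => false                                     -- area1 is None
  | some a1 => pvCountryToArea.get? region2 == some a1  -- a1 == index.get(region2)

-- ===== PRECONDITION & SPEC =====
def Spec_regions_in_same_area_py (region1 : String) (region2 : String) (out : Bool) : Prop := out = regions_in_same_area_py_alt region1 region2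
instance (region1 : String) (region2 : String) (out : Bool) : Decidable (Spec_regions_in_same_area_py region1 region2 out) := by unfold Spec_regions_in_same_area_py; infer_instance

-- ===== CLAIM (what is proved, stated in full; the proofs are below) =====
def Claim_equal_regions_in_same_area_py : Prop := ∀ (region1 : String) (region2 : String), Dom_regions_in_same_area_py region1 region2 → Spec_regions_in_same_area_py region1 region2 (regions_in_same_area_py region1 region2)

-- ===== LEMMAS AND PROOFS =====

-- all 32 country codes, in the order they appear
def pvAllCountries : List String := pvAreaMapping.flatMap (·.2)

-- a string that is no country code is in none of the four region lists
lemma pvLoopA_of_left_not_mem (s t : String) (hs : s ∉ pvAllCountries) :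
    pvLoopA pvAreaMapping s t = false := by
  simp only [pvAllCountries, pvAreaMapping, List.flatMap_cons, List.flatMap_nil,
    List.mem_append, List.not_mem_nil, or_false, not_or] at hs
  obtain ⟨h1, h2, h3, h4⟩ := hs
  simp [pvAreaMapping, pvLoopA, List.contains_eq_mem, h1, h2, h3, h4]

lemma pvLoopA_of_right_not_mem (s t : String) (ht : t ∉ pvAllCountries) :
    pvLoopA pvAreaMapping s t = false := by
  simp only [pvAllCountries, pvAreaMapping, List.flatMap_cons, List.flatMap_nil,
    List.mem_append, List.not_mem_nil, or_false, not_or] at ht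
  obtain ⟨h1, h2, h3, h4⟩ := ht
  simp [pvAreaMapping, pvLoopA, List.contains_eq_mem, h1, h2, h3, h4]

-- the reverse index has no entry for a string that is no country code
lemma pvGet?_of_not_mem (s : String) (hs : s ∉ pvAllCountries) :
    pvCountryToArea.get? s = none := by
  have hkeys : ∀ p ∈ pvCountryToArea.items, p.1 ∈ pvAllCountries := by decide
  simp only [PySem.Dict.get?, Option.map_eq_none_iff]
  rw [List.find?_eq_none]
  intro p hp
  simp only [beq_iff_eq]
  intro h
  exact hs (h ▸ hkeys p hp)

-- ===== VERDICT (by name: the statement is the Claim_ definition above) =====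
theorem regions_in_same_area_py_spec : Claim_equal_regions_in_same_area_py := by
  intro r1 r2 _
  unfold Spec_regions_in_same_area_py
  by_cases hs : r1 ∈ pvAllCountries
  · by_cases ht : r2 ∈ pvAllCountries
    · fin_cases hs <;> fin_cases ht <;> decide
    · fin_cases hs <;>
        simp [regions_in_same_area_py, regions_in_same_area_py_alt,
          pvLoopA_of_right_not_mem _ _ ht, pvGet?_of_not_mem _ ht] <;>
        (split <;> rfl)
  · simp [regions_in_same_area_py, regions_in_same_area_py_alt,
      pvLoopA_of_left_not_mem _ _ hs, pvGet?_of_not_mem _ hs]
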